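-- pv_equiv track=rewrite | github.com/cwenao/python_web_learn | base100/base100/base_100.py | assemblyNum
-- ===== SOURCE A (Python) =====
-- def assemblyNum(num,targetD,length):
--     temp = num
--
--     for i in range(len(targetD)):
--         num = temp*10+targetD[i]
--         if length==3:
--             yield num
--         elif length<3:
--             for x in assemblyNum(num,targetD[:i]+targetD[i+1:],length+1):
--                 yield x
-- ===== SOURCE B (Python) =====
-- from itertools import permutations
--
-- def assemblyNum(num, targetD, length):
--     k = 4 - length
--     if length <= 3 and k <= len(targetD):
--         for perm in permutations(targetD, k):
--             acc = num
--             for d in perm: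
--                 acc = acc * 10 + d
--             yield acc
-- ===== Notes on version B (the rewrite author's own statement) =====
-- stated objective: idiomatic
-- what changed: B replaces A's recursive generator that threads the numeric accumulator through the enumeration by itertools.permutations(targetD, 4-length) followed by an explicit acc=acc*10+d fold per permutation (C-level enumeration, no Python recursion or list slicing).
import Mathlib
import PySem

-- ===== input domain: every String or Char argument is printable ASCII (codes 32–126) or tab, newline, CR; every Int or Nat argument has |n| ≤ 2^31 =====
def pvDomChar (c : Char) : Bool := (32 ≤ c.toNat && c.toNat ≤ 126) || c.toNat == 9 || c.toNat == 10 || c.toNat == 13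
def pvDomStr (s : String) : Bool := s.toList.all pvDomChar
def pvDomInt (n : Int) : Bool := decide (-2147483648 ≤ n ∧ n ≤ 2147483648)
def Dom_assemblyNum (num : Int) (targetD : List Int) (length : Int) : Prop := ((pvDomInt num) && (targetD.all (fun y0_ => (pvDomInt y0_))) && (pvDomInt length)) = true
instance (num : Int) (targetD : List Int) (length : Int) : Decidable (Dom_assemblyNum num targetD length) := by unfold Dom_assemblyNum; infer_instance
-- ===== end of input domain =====

-- B replaces A's accumulator-threading recursive generator by an explicit k-permutation
-- enumeration followed by a digit fold (objective: idiomatic; return value only — neither mutates).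

-- ===== PORT A =====
-- A's `for i in range(len(targetD))` loop with the recursive generator inlined as a mutual helper;
-- `targetD[:i]+targetD[i+1:]` is exactly `take i ++ drop (i+1)` for the in-range Nat index i,
-- and `targetD[i]` (i < length) is exactly `getD i 0`.
mutual
def assemblyNum (num : Int) (targetD : List Int) (length : Int) : List Int :=
  assemblyNumLoop num targetD length 0
termination_by (targetD.length, targetD.length + 2)
decreasing_by exact Prod.Lex.right _ (by omega)

def assemblyNumLoop (temp : Int) (targetD : List Int) (length : Int) (i : Nat) : List Int :=
  if _h : i < targetD.length then
    (if length == 3 then [temp * 10 + targetD.getD i 0]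
     else if length < 3 then
       assemblyNum (temp * 10 + targetD.getD i 0) (targetD.take i ++ targetD.drop (i+1)) (length + 1)
     else []) ++ assemblyNumLoop temp targetD length (i+1)
  else []
termination_by (targetD.length, targetD.length + 1 - i)
decreasing_by
  · apply Prod.Lex.left; simp [List.length_take, List.length_drop]; omega
  · exact Prod.Lex.right _ (by omega)
end

-- ===== PORT B =====
-- k-permutations of xs in itertools.permutations order (pick index i left to right, recurse on the rest)
def pyPerms (k : Nat) (xs : List Int) : List (List Int) :=
  match k with
  | 0 => [[]]
  | Nat.succ m =>
    (List.range xs.length).flatMap (fun i =>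
      (pyPerms m (xs.take i ++ xs.drop (i+1))).map (fun p => xs.getD i 0 :: p))

def assemblyNum_alt (num : Int) (targetD : List Int) (length : Int) : List Int :=
  if length ≤ 3 ∧ 4 - length ≤ (targetD.length : Int) then
    (pyPerms (4 - length).toNat targetD).map (fun p => p.foldl (fun a d => a * 10 + d) num)
  else []

-- ===== PRECONDITION & SPEC =====
def Spec_assemblyNum (num : Int) (targetD : List Int) (length : Int) (out : List Int) : Prop := out = assemblyNum_alt num targetD length
instance (num : Int) (targetD : List Int) (length : Int) (out : List Int) : Decidable (Spec_assemblyNum num targetD length out) := by unfold Spec_assemblyNum; infer_instance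

-- ===== CLAIM (what is proved, stated in full; the proofs are below) =====
def Claim_equal_assemblyNum : Prop := ∀ (num : Int) (targetD : List Int) (length : Int), Dom_assemblyNum num targetD length → Spec_assemblyNum num targetD length (assemblyNum num targetD length)

-- ===== LEMMAS AND PROOFS =====

-- the contribution of loop index j in A
def pvBody (temp : Int) (xs : List Int) (length : Int) (j : Nat) : List Int :=
  if length == 3 then [temp * 10 + xs.getD j 0]
  else if length < 3 then
    assemblyNum (temp * 10 + xs.getD j 0) (xs.take j ++ xs.drop (j+1)) (length + 1)
  else []

theorem pvFlatMap_congr {α β : Type} (l : List α) (f g : α → List β)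
    (h : ∀ a ∈ l, f a = g a) : l.flatMap f = l.flatMap g := by
  induction l with
  | nil => rfl
  | cons x xs ih =>
    simp [List.flatMap_cons, h x (by simp), ih (fun a ha => h a (by simp [ha]))]

theorem pvLoop_eq (temp : Int) (xs : List Int) (length : Int) :
    ∀ (n i : Nat), i + n = xs.length →
    assemblyNumLoop temp xs length i = (List.range' i n).flatMap (pvBody temp xs length) := by
  intro n
  induction n with
  | zero =>
    intro i hi
    rw [assemblyNumLoop]
    simp [show ¬ i < xs.length by omega]
  | succ m ih =>
    intro i hi
    rw [assemblyNumLoop]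
    have h : i < xs.length := by omega
    rw [dif_pos h, List.range'_succ, List.flatMap_cons, ih (i+1) (by omega)]
    rfl

theorem pvA_eq (num : Int) (xs : List Int) (length : Int) :
    assemblyNum num xs length = (List.range xs.length).flatMap (pvBody num xs length) := by
  rw [assemblyNum, pvLoop_eq num xs length xs.length 0 (by omega), List.range_eq_range']

theorem pvMain : ∀ (k : Nat) (num : Int) (xs : List Int) (length : Int),
    length ≤ 3 → (4 - length).toNat = k + 1 →
    assemblyNum num xs length
      = (pyPerms (k+1) xs).map (fun p => p.foldl (fun a d => a * 10 + d) num) := by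
  intro k
  induction k with
  | zero =>
    intro num xs length hle hk
    have h3 : length = 3 := by omega
    subst h3
    rw [pvA_eq, pyPerms, List.map_flatMap]
    apply pvFlatMap_congr
    intro i _
    simp [pvBody, pyPerms, List.foldl]
  | succ m ih =>
    intro num xs length hle hk
    have hlt : length < 3 := by omega
    rw [pvA_eq, pyPerms, List.map_flatMap]
    apply pvFlatMap_congr
    intro i _
    have hne : ¬ (length == 3) = true := by simp; omega
    rw [pvBody, if_neg hne, if_pos hlt, ih _ _ (length + 1) (by omega) (by omega), List.map_map]
    rfl

theorem assemblyNum_total_gt3 (num : Int) (xs : List Int) (length : Int)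
    (h : ¬ length ≤ 3) : assemblyNum num xs length = [] := by
  rw [pvA_eq]
  rw [pvFlatMap_congr _ _ (fun _ => []) (by
    intro a _
    simp only [pvBody]
    have : ¬ (length == 3) = true := by simp; omega
    simp [this, show ¬ length < 3 by omega])]
  simp

theorem pyPerms_nil : ∀ (k : Nat) (xs : List Int), xs.length < k → pyPerms k xs = [] := by
  intro k
  induction k with
  | zero => intro xs h; omega
  | succ m ih =>
    intro xs h
    rw [pyPerms, pvFlatMap_congr _ _ (fun _ => []) (by
      intro i hi
      rw [ih _ (by simp at hi ⊢; omega)]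
      rfl)]
    simp

-- ===== VERDICT (by name: the statement is the Claim_ definition above) =====
theorem assemblyNum_spec : Claim_equal_assemblyNum := by
  intro num xs length _
  unfold Spec_assemblyNum assemblyNum_alt
  by_cases hle : length ≤ 3
  · obtain ⟨k, hk⟩ : ∃ k, (4 - length).toNat = k + 1 := ⟨(3 - length).toNat, by omega⟩
    rw [pvMain k num xs length hle hk]
    by_cases hg : 4 - length ≤ (xs.length : Int)
    · rw [if_pos ⟨hle, hg⟩, hk]
    · rw [if_neg (by tauto), pyPerms_nil (k+1) xs (by omega)]
      rfl
  · rw [if_neg (by tauto), assemblyNum_total_gt3 num xs length hle]
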